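-- pv_equiv track=rewrite | github.com/HasonCode/FlingSolver | extra.py | oneA
-- ===== SOURCE A (Python) =====
-- def oneA(n:int):
--     ret_val = ""
--     add_val = "**"
--     final_string = ""
--     for i in range(1,n+1):
--         if i==1:
--             ret_val+="*\n"
--             final_string += "*"
--         elif i>1 and i<n:
--             ret_val+=add_val+"\n"
--             add_val = add_val[0]+" "+add_val[1:]
--             final_string +="*"
--         else:
--             ret_val+=final_string+"*"
--     return ret_val
-- ===== SOURCE B (Python) =====
-- def oneA(n: int):
--     if n < 1:
--         return ""
--     if n == 1:
--         return "*"
--     rows = ["*"] + ["*" + " " * (i - 2) + "*" for i in range(2, n)] + ["*" * n]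
--     return "\n".join(rows)
-- ===== Notes on version B (the rewrite author's own statement) =====
-- stated objective: simpler
-- what changed: Each row is computed by an independent closed-form formula ('*' + spaces + '*') and the rows are joined once with '\n', replacing A's loop that threads three mutated string accumulators (ret_val, add_val, final_string) across iterations.
-- intended difference: For n == 1 A returns '*\n' with a trailing newline (an artefact of its first-iteration branch, since no other output of A ends in a newline), while B returns '*' consistent with all other sizes; B's value is the intended one. — e.g. on oneA(1): A returns "*\n", B returns "*"
import Mathlib
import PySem

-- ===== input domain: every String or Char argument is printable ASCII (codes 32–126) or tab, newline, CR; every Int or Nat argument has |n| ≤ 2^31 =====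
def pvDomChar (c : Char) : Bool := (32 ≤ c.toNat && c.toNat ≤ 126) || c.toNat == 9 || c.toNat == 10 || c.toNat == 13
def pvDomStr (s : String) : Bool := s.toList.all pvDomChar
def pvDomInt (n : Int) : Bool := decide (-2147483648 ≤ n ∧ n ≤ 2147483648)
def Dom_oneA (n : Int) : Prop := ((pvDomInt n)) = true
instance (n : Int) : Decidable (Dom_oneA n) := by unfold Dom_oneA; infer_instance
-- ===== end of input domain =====

-- B builds each row by closed form and joins them once; A threads three mutated
-- string accumulators through a loop. Objective: simpler. For n == 1, A's value
-- carries an accidental trailing newline; B returns '*' (see D_oneA below).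


-- ===== PORT A =====
-- loop body of A; state = (ret_val, add_val, final_string) as lists of chars
def oneA_loop (n : Int) (st : List Char × List Char × List Char) (i : Int) :
    List Char × List Char × List Char :=
  let (ret, add, fin) := st
  if i = 1 then (ret ++ ['*', '\n'], add, fin ++ ['*'])
  else if 1 < i ∧ i < n then
    -- add_val = add_val[0] + " " + add_val[1:]; add_val is never empty here,
    -- so the pyGet? cannot miss (the none branch only makes the match total)
    (ret ++ add ++ ['\n'],
     (match PySem.List.pyGet? add 0 with
      | some c => [c] ++ [' '] ++ PySem.List.slice add (some 1) none
      | none => []),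
     fin ++ ['*'])
  else (ret ++ fin ++ ['*'], add, fin)

def oneA (n : Int) : String :=
  String.ofList ((PySem.List.pyRange 1 (n + 1) 1).foldl (oneA_loop n) ([], ['*', '*'], [])).1

-- ===== PORT B =====
-- row for i in range(2, n): "*" + " "*(i-2) + "*"
def oneA_row (i : Int) : List Char := ['*'] ++ List.replicate (i - 2).toNat ' ' ++ ['*']

def oneA_alt (n : Int) : String :=
  if n < 1 then ""
  else if n = 1 then "*"
  else
    String.ofList (PySem.Chars.join ['\n']
      ([['*']] ++ (PySem.List.pyRange 2 n 1).map oneA_row ++ [List.replicate n.toNat '*']))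

-- ===== PRECONDITION & SPEC =====
-- For n == 1 A returns "*\n" (a trailing newline no other output of A has,
-- an artefact of its first-iteration branch); B returns "*", the intended value.
def D_oneA (n : Int) : Prop := n = 1
instance (n : Int) : Decidable (D_oneA n) := by unfold D_oneA; infer_instance
def Spec_oneA (n : Int) (out : String) : Prop := ¬ D_oneA n → out = oneA_alt n
instance (n : Int) (out : String) : Decidable (Spec_oneA n out) := by unfold Spec_oneA; infer_instance
def pvDiffWitness_oneA : Int := 1
def pvDiffWitnessOut_oneA : String × String := ("*\n", "*")

-- ===== CLAIM (what is proved, stated in full; the proofs are below) =====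
def Claim_unchanged_oneA : Prop := ∀ (n : Int), Dom_oneA n → Spec_oneA n (oneA n)
def Claim_changed_oneA : Prop := Dom_oneA (pvDiffWitness_oneA) ∧ D_oneA (pvDiffWitness_oneA) ∧ oneA (pvDiffWitness_oneA) = pvDiffWitnessOut_oneA.1 ∧ oneA_alt (pvDiffWitness_oneA) = pvDiffWitnessOut_oneA.2 ∧ pvDiffWitnessOut_oneA.1 ≠ pvDiffWitnessOut_oneA.2
def Claim_exact_oneA : Prop := ∀ (n : Int), Dom_oneA n → D_oneA n → oneA n ≠ oneA_alt n

-- ===== LEMMAS AND PROOFS =====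

-- the add_val accumulator after the middle branch has fired m times
def addC (m : Nat) : List Char := '*' :: (List.replicate m ' ' ++ ['*'])

-- ret_val after iterations i = 1 .. m+1 (all rows except the base row)
def retC (m : Nat) : List Char :=
  ['*', '\n'] ++ ((PySem.List.pyRange 2 ((m : Int) + 2) 1).map oneA_row).flatMap (· ++ ['\n'])

lemma row_cast (m : Nat) : oneA_row ((m : Int) + 2) = addC m := by
  simp [oneA_row, addC]

lemma loopA (n : Int) (m : Nat) (h : (m : Int) + 2 ≤ n) :
    (PySem.List.pyRange 1 ((m : Int) + 2) 1).foldl (oneA_loop n) ([], ['*', '*'], [])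
      = (retC m, addC m, List.replicate (m + 1) '*') := by
  induction m with
  | zero =>
      have h1 : PySem.List.pyRange 1 (0 + 2 : Int) 1 = [1] := by decide
      simp only [Int.natCast_zero] at *
      rw [h1]
      simp [oneA_loop, retC, addC]
  | succ m ih =>
      have hm : (m : Int) + 2 ≤ n := by push_cast at h ⊢; omega
      have hsplit : PySem.List.pyRange 1 (((m : Nat) + 1 : Nat) + 2 : Int) 1
          = PySem.List.pyRange 1 ((m : Int) + 2) 1 ++ [(m : Int) + 2] := by
        have : (((m : Nat) + 1 : Nat) + 2 : Int) = ((m : Int) + 2) + 1 := by push_cast; ring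
        rw [this, PySem.List.pyRange_one_succ_right (by omega)]
      rw [hsplit, List.foldl_append, ih hm]
      have hne1 : ¬ ((m : Int) + 2 = 1) := by omega
      have hmid : (1 : Int) < (m : Int) + 2 ∧ (m : Int) + 2 < n := by
        constructor
        · omega
        · push_cast at h; omega
      simp only [List.foldl, oneA_loop, if_neg hne1, if_pos hmid]
      refine Prod.ext ?_ (Prod.ext ?_ ?_)
      · -- ret_val
        show retC m ++ addC m ++ ['\n'] = retC (m + 1)
        have hstep : PySem.List.pyRange 2 ((m : Int) + 1 + 2) 1
            = PySem.List.pyRange 2 ((m : Int) + 2) 1 ++ [(m : Int) + 2] := by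
          have e : (m : Int) + 1 + 2 = ((m : Int) + 2) + 1 := by ring
          rw [e, PySem.List.pyRange_one_succ_right (by omega)]
        simp only [retC, Nat.cast_add, Nat.cast_one]
        rw [hstep]
        simp [row_cast, List.append_assoc]
      · -- add_val
        show (match PySem.List.pyGet? (addC m) 0 with
              | some c => [c] ++ [' '] ++ PySem.List.slice (addC m) (some 1) none
              | none => []) = addC (m + 1)
        have hget : PySem.List.pyGet? (addC m) 0 = some '*' := by
          have h0 : (0 : Int) ≤ (m : Int) + 1 := by omega
          simp [addC, PySem.List.pyGet?, PySem.List.pyIdx?, h0]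
        rw [hget]
        simp [addC, PySem.List.slice_from_one, List.replicate_succ]
      · -- final_string
        show List.replicate (m + 1) '*' ++ ['*'] = List.replicate (m + 1 + 1) '*'
        simp [List.replicate_succ']

-- the join in B, peeled to the same closed form
lemma join_last (l : List (List Char)) (t : List Char) :
    PySem.Chars.join ['\n'] (l ++ [t]) = l.flatMap (· ++ ['\n']) ++ t := by
  induction l with
  | nil => simp [PySem.Chars.join_singleton]
  | cons a l ih =>
      cases hl : l ++ [t] with
      | nil => exact absurd hl (by simp)
      | cons b rest =>
          rw [List.cons_append, hl, PySem.Chars.join_cons_cons, ← hl, ih]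
          simp

lemma main_eq (n : Int) (hn : 2 ≤ n) : oneA n = oneA_alt n := by
  obtain ⟨m, hm⟩ : ∃ m : Nat, n = (m : Int) + 2 := ⟨(n - 2).toNat, by omega⟩
  subst hm
  -- A side
  have hsplit : PySem.List.pyRange 1 ((m : Int) + 2 + 1) 1
      = PySem.List.pyRange 1 ((m : Int) + 2) 1 ++ [(m : Int) + 2] := by
    rw [PySem.List.pyRange_one_succ_right (by omega)]
  have hA : oneA ((m : Int) + 2)
      = String.ofList (retC m ++ List.replicate (m + 1) '*' ++ ['*']) := by
    unfold oneA
    rw [hsplit, List.foldl_append, loopA _ m le_rfl]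
    have hne1 : ¬ ((m : Int) + 2 = 1) := by omega
    simp [oneA_loop, if_neg hne1]
  -- B side
  have hB : oneA_alt ((m : Int) + 2)
      = String.ofList (retC m ++ List.replicate (m + 2) '*') := by
    unfold oneA_alt
    rw [if_neg (by omega), if_neg (by omega)]
    have ht : ((m : Int) + 2).toNat = m + 2 := by omega
    rw [ht, join_last]
    simp [retC]
  rw [hA, hB]
  have : List.replicate (m + 1) '*' ++ ['*'] = List.replicate (m + 2) '*' := by
    simp [List.replicate_succ']
  rw [List.append_assoc, this]

-- ===== VERDICT (by name: the statement is the Claim_ definition above) =====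
theorem oneA_spec : Claim_unchanged_oneA := by
  intro n _ hD
  have hne : n ≠ 1 := hD
  rcases lt_or_ge n 1 with h | h
  · -- n ≤ 0: A's range is empty, B returns ""
    have hr : PySem.List.pyRange 1 (n + 1) 1 = [] :=
      PySem.List.pyRange_one_eq_nil (by omega)
    unfold oneA oneA_alt
    rw [hr, if_pos h]
    rfl
  · exact main_eq n (by omega)

theorem oneA_changed : Claim_changed_oneA := by unfold Claim_changed_oneA; decide

theorem oneA_tight : Claim_exact_oneA := by
  intro n _ hD
  unfold D_oneA at hD
  subst hD
  decide
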